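-- pv_equiv track=rewrite | github.com/taugin/tools | script/apkmerger/merge_splitdex.py | add_prefix_files_to_front
-- ===== SOURCE A (Python) =====
-- def has_special_prefix(file, prefix):
--     for p in prefix:
--         if (p in file):
--             return True
--     return False
--
-- def add_prefix_files_to_front(allFiles, prefix):
--     '''将指定前缀的文件放到前面'''
--     if (prefix == None or len(prefix) <= 0):
--         return allFiles
--
--     headFiles = []
--     tailFiles = []
--     for f in allFiles:
--         contain = has_special_prefix(f, prefix)
--         if (contain):
--             headFiles.append(f)
--         else:
--             tailFiles.append(f)
--     allFiles = headFiles + tailFiles;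
--     return allFiles
-- ===== SOURCE B (Python) =====
-- def add_prefix_files_to_front(allFiles, prefix):
--     '''将指定前缀的文件放到前面'''
--     if prefix == None or len(prefix) <= 0:
--         return allFiles
--     return sorted(allFiles, key=lambda f: 0 if any(p in f for p in prefix) else 1)
-- ===== Notes on version B (the rewrite author's own statement) =====
-- stated objective: idiomatic
-- what changed: Replaces the explicit two-bucket partition loop (head/tail lists appended element by element and concatenated) with a single stable sort by a 0/1 key; sort stability preserves the relative order inside each group, so the output is identical.
import Mathlib
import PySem

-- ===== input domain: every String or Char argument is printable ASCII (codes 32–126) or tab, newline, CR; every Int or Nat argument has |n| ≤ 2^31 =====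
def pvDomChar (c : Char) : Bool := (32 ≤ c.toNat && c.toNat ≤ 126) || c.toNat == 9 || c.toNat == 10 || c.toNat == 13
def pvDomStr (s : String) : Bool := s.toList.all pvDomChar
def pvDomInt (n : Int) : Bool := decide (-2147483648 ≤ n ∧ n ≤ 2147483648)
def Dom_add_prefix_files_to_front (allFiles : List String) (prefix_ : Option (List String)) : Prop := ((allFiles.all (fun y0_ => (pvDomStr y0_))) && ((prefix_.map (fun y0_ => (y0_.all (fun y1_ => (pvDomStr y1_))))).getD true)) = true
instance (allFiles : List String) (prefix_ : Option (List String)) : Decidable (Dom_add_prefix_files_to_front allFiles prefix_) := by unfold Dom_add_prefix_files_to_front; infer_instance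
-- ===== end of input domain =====

-- B replaces A's two-bucket partition loop with a single stable sort by a 0/1 key (idiomatic; same output by stability).

-- ===== PORT A =====
-- early-return loop over prefix: return True at the first p with 'p in file'
def has_special_prefix (file : String) (prefix_ : List String) : Bool :=
  match prefix_ with
  | [] => false
  | p :: rest => if PySem.Str.isIn p file then true else has_special_prefix file rest

def add_prefix_files_to_front (allFiles : List String) (prefix_ : Option (List String)) : List String :=
  match prefix_ with
  | none => allFiles
  | some pre =>
    if pre.length ≤ 0 then allFiles
    else
      let acc := allFiles.foldl
        (fun (acc : List String × List String) f =>
          let contain := has_special_prefix f pre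
          if contain then (acc.1 ++ [f], acc.2) else (acc.1, acc.2 ++ [f]))
        ([], [])
      acc.1 ++ acc.2

-- ===== PORT B =====
-- key=lambda f: 0 if any(p in f for p in prefix) else 1
def pvAltKey (pre : List String) (f : String) : Int :=
  if pre.any (fun p => PySem.Str.isIn p f) then 0 else 1

def add_prefix_files_to_front_alt (allFiles : List String) (prefix_ : Option (List String)) : List String :=
  match prefix_ with
  | none => allFiles
  | some pre =>
    if pre.length ≤ 0 then allFiles
    else PySem.List.sorted allFiles (pvAltKey pre) false

-- ===== PRECONDITION & SPEC =====
def Spec_add_prefix_files_to_front (allFiles : List String) (prefix_ : Option (List String)) (out : List String) : Prop := out = add_prefix_files_to_front_alt allFiles prefix_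
instance (allFiles : List String) (prefix_ : Option (List String)) (out : List String) : Decidable (Spec_add_prefix_files_to_front allFiles prefix_ out) := by unfold Spec_add_prefix_files_to_front; infer_instance

-- ===== CLAIM (what is proved, stated in full; the proofs are below) =====
def Claim_equal_add_prefix_files_to_front : Prop := ∀ (allFiles : List String) (prefix_ : Option (List String)), Dom_add_prefix_files_to_front allFiles prefix_ → Spec_add_prefix_files_to_front allFiles prefix_ (add_prefix_files_to_front allFiles prefix_)

-- ===== LEMMAS AND PROOFS =====

theorem has_eq_any (file : String) (pre : List String) :
    has_special_prefix file pre = pre.any (fun p => PySem.Str.isIn p file) := by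
  induction pre with
  | nil => rfl
  | cons p rest ih =>
    simp only [has_special_prefix]
    split_ifs with h
    · simp at h; simp [h]
    · simp at h; simp [h, ih]

-- the 0/1-valued key
theorem pvAltKey_cases (pre : List String) (f : String) :
    pvAltKey pre f = 0 ∨ pvAltKey pre f = 1 := by
  unfold pvAltKey; split_ifs <;> simp

theorem insertBy_append_of_not {α : Type} (before : α → α → Bool) (x : α) (l : List α)
    (h : ∀ y ∈ l, before x y = false) :
    PySem.List.insertBy before x l = l ++ [x] := by
  induction l with
  | nil => rfl
  | cons a l ih =>
    have ha : before x a = false := h a (by simp)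
    simp only [PySem.List.insertBy, ha]
    simp [ih (fun y hy => h y (by simp [hy]))]

theorem insertBy_split {α : Type} (before : α → α → Bool) (x a : α) (h t : List α)
    (hh : ∀ y ∈ h, before x y = false) (ha : before x a = true) :
    PySem.List.insertBy before x (h ++ a :: t) = h ++ x :: a :: t := by
  induction h with
  | nil => simp [PySem.List.insertBy, ha]
  | cons b h ih =>
    have hb : before x b = false := hh b (by simp)
    simp only [List.cons_append, PySem.List.insertBy, hb]
    simp [ih (fun y hy => hh y (by simp [hy]))]

-- the stable insertion sort by a 0/1 key is exactly the partition
theorem foldl_insertBy_01 {α : Type} (key : α → Int)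
    (hk : ∀ x, key x = 0 ∨ key x = 1) :
    ∀ (xs h t : List α), (∀ y ∈ h, key y = 0) → (∀ y ∈ t, key y = 1) →
    xs.foldl (fun acc x => PySem.List.insertBy (fun a b => decide (key a < key b)) x acc) (h ++ t)
      = (h ++ xs.filter (fun x => key x == 0)) ++ (t ++ xs.filter (fun x => !(key x == 0))) := by
  intro xs
  induction xs with
  | nil => intro h t _ _; simp
  | cons x xs ih =>
    intro h t hh ht
    simp only [List.foldl_cons]
    rcases hk x with hx | hx
    · have hstep : PySem.List.insertBy (fun a b => decide (key a < key b)) x (h ++ t)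
          = (h ++ [x]) ++ t := by
        cases t with
        | nil =>
          simp only [List.append_nil]
          exact insertBy_append_of_not _ _ _ (fun y hy => by
            have := hh y hy; simp [this, hx])
        | cons a t' =>
          have ha : (fun a b => decide (key a < key b)) x a = true := by
            have := ht a (by simp); simp [this, hx]
          have := insertBy_split (fun a b => decide (key a < key b)) x a h t'
            (fun y hy => by have := hh y hy; simp [this, hx]) ha
          simpa using this
      rw [hstep, ih (h ++ [x]) t
        (by intro y hy; rcases List.mem_append.1 hy with hy | hy
            · exact hh y hy
            · simp at hy; subst hy; exact hx) ht]
      simp [hx]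
    · have hstep : PySem.List.insertBy (fun a b => decide (key a < key b)) x (h ++ t)
          = h ++ (t ++ [x]) := by
        have := insertBy_append_of_not (fun a b => decide (key a < key b)) x (h ++ t)
          (fun y hy => by
            rcases List.mem_append.1 hy with hy | hy
            · have := hh y hy; simp [this, hx]
            · have := ht y hy; simp [this, hx])
        simpa using this
      rw [hstep, ih h (t ++ [x]) hh
        (by intro y hy; rcases List.mem_append.1 hy with hy | hy
            · exact ht y hy
            · simp at hy; subst hy; exact hx)]
      simp [hx]

-- A's partition fold, characterised
theorem foldA_eq (pre : List String) :
    ∀ (xs : List String) (h t : List String),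
    xs.foldl (fun (acc : List String × List String) f =>
        let contain := has_special_prefix f pre
        if contain then (acc.1 ++ [f], acc.2) else (acc.1, acc.2 ++ [f])) (h, t)
      = (h ++ xs.filter (fun f => has_special_prefix f pre),
         t ++ xs.filter (fun f => !has_special_prefix f pre)) := by
  intro xs
  induction xs with
  | nil => intro h t; simp
  | cons x xs ih =>
    intro h t
    simp only [List.foldl_cons]
    by_cases hx : has_special_prefix x pre = true
    · simp only [hx, ih]
      simp [hx]
    · simp only [Bool.not_eq_true] at hx
      simp only [hx, Bool.false_eq_true, if_false, ih]
      simp [hx]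

theorem key0_eq (pre : List String) (x : String) :
    (pvAltKey pre x == 0) = has_special_prefix x pre := by
  rw [has_eq_any]; unfold pvAltKey
  by_cases h : (pre.any fun p => PySem.Str.isIn p x) = true
  · rw [if_pos h, h]; rfl
  · rw [if_neg h]; rw [Bool.not_eq_true] at h; rw [h]; rfl

theorem filter_key_eq (pre : List String) (xs : List String) :
    xs.filter (fun x => pvAltKey pre x == 0) = xs.filter (fun f => has_special_prefix f pre)
    ∧ xs.filter (fun x => !(pvAltKey pre x == 0)) = xs.filter (fun f => !has_special_prefix f pre) := by
  refine ⟨List.filter_congr ?_, List.filter_congr ?_⟩ <;> intro x _ <;> simp [key0_eq]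

-- ===== VERDICT (by name: the statement is the Claim_ definition above) =====
theorem add_prefix_files_to_front_spec : Claim_equal_add_prefix_files_to_front := by
  intro allFiles prefix_ _
  unfold Spec_add_prefix_files_to_front add_prefix_files_to_front add_prefix_files_to_front_alt
  cases prefix_ with
  | none => rfl
  | some pre =>
    by_cases hlen : pre.length ≤ 0
    · simp [hlen]
    · simp only [hlen, if_false]
      rw [PySem.List.sorted_eq_foldl_insertBy]
      have h01 := foldl_insertBy_01 (pvAltKey pre) (pvAltKey_cases pre) allFiles [] []
        (by simp) (by simp)
      simp only [List.nil_append] at h01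
      rw [foldA_eq pre allFiles [] []]
      simp only [List.nil_append]
      rw [h01, (filter_key_eq pre allFiles).1, (filter_key_eq pre allFiles).2]
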